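-- pv_equiv track=rewrite | github.com/P3trah/Phase-3-Week-1-Python-Toy-Problems- | max_sum.py | solution
-- ===== SOURCE A (Python) =====
-- def digit_sum(n):
--     return sum(int(digit) for digit in str(n))
--
-- def solution(A):
--     digit_sum_dict = {}
--     max_sum = -1
--
--     for num in A:
--         current_sum = digit_sum(num)
--
--         if current_sum in digit_sum_dict:
--             max_sum = max(max_sum, num + digit_sum_dict[current_sum])
--
--         digit_sum_dict[current_sum] = max(digit_sum_dict.get(current_sum, 0), num)
--
--     return max_sum
-- ===== SOURCE B (Python) =====
-- def digit_sum(n):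
--     return sum(int(digit) for digit in str(n))
--
-- def solution(A):
--     # two-phase: bucket all numbers by digit sum, then scan each bucket for its two largest
--     buckets = {}
--     for num in A:
--         buckets.setdefault(digit_sum(num), []).append(num)
--
--     best = -1
--     for nums in buckets.values():
--         if len(nums) >= 2:
--             hi, lo = (nums[0], nums[1]) if nums[0] >= nums[1] else (nums[1], nums[0])
--             for x in nums[2:]:
--                 if x > hi:
--                     lo, hi = hi, x
--                 elif x > lo:
--                     lo = x
--             best = max(best, hi + lo)
--     return best
-- ===== Notes on version B (the rewrite author's own statement) =====
-- stated objective: alternative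
-- what changed: A keeps one running best-pair maximum while streaming, storing only the per-digit-sum maximum seen so far; B is two-phase: it first buckets all numbers by digit sum into lists, then scans each bucket of size >= 2 for its two largest elements and takes the maximum pair sum over buckets.
import Mathlib
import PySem

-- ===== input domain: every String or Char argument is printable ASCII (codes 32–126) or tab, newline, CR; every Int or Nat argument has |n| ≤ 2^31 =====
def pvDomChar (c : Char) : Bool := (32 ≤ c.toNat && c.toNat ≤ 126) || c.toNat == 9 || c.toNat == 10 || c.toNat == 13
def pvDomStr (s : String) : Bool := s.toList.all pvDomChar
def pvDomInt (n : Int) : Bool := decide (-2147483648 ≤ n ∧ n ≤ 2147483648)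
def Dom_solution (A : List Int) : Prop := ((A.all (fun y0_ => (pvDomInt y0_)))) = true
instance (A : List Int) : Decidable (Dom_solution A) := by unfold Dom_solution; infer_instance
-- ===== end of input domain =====

-- B replaces A's one-pass running best-pair with a two-phase build-buckets-then-scan-top-two
-- of each bucket; same cost, alternative decomposition.

-- ===== PORT A =====
-- digit_sum(n) = sum(int(digit) for digit in str(n)); int('-') raises ValueError, so A only
-- returns on nonnegative inputs (Pre_ below); the getD 0 is only reached outside Pre_.
def digitSum (n : Int) : Int :=
  ((PySem.Int.toStr n).toList.map (fun c => (PySem.Int.ofStr? (String.ofList [c])).getD 0)).sum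

-- loop body of A: state = (digit_sum_dict, max_sum); digit_sum_dict[cs] under the 'in' guard
-- is getD cs 0 (any default: the key is present).
def solStep (st : PySem.Dict Int Int × Int) (num : Int) : PySem.Dict Int Int × Int :=
  let cs := digitSum num
  let m := if st.1.contains cs then max st.2 (num + st.1.getD cs 0) else st.2
  (st.1.insert cs (max (st.1.getD cs 0) num), m)

def solution (A : List Int) : Int :=
  (A.foldl solStep (PySem.Dict.empty, -1)).2

-- ===== PORT B =====
-- phase 1: buckets.setdefault(digit_sum(num), []).append(num)
def buildBuckets (A : List Int) : PySem.Dict Int (List Int) :=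
  A.foldl (fun d num => d.modify (digitSum num) [] (fun l => l ++ [num])) PySem.Dict.empty

-- inner loop of phase 2: running (hi, lo) = two largest so far
def t2step (p : Int × Int) (x : Int) : Int × Int :=
  if x > p.1 then (x, p.1) else if x > p.2 then (p.1, x) else p

-- hi + lo for a bucket of length ≥ 2 (the length-< 2 case is never reached by solution_alt)
def top2sum (nums : List Int) : Int :=
  match nums with
  | a :: b :: rest =>
      let p := rest.foldl t2step (if a ≥ b then (a, b) else (b, a))
      p.1 + p.2
  | _ => 0

def solution_alt (A : List Int) : Int :=
  (buildBuckets A).values.foldl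
    (fun best nums => if 2 ≤ nums.length then max best (top2sum nums) else best) (-1)

-- ===== PRECONDITION & SPEC =====
-- Pre_ excludes lists containing a negative number: on those A raises ValueError
-- (int('-') inside digit_sum), and so does B.
def Pre_solution (A : List Int) : Prop := ∀ x ∈ A, 0 ≤ x
instance (A : List Int) : Decidable (Pre_solution A) := by unfold Pre_solution; infer_instance
def pvWitness_solution : List Int := ([12, 21, 3])

def Spec_solution (A : List Int) (out : Int) : Prop := out = solution_alt A
instance (A : List Int) (out : Int) : Decidable (Spec_solution A out) := by unfold Spec_solution; infer_instance

-- ===== CLAIM (what is proved, stated in full; the proofs are below) =====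
def Claim_equal_solution : Prop := ∀ (A : List Int), Dom_solution A → Pre_solution A → Spec_solution A (solution A)

-- ===== LEMMAS AND PROOFS =====

-- the bucket of digit-sum k in A
def bucketOf (A : List Int) (k : Int) : List Int := A.filter (fun n => digitSum n == k)

-- contribution of one bucket to B's second pass
def contrib (l : List Int) : Int := if 2 ≤ l.length then top2sum l else -1

-- generic max-fold over a key list
def Fg (g : Int → Int) (K : List Int) (b : Int) : Int := K.foldl (fun b k => max b (g k)) b

-- B's value in key-fold form
def BV (A : List Int) : Int :=
  Fg (fun k => contrib (bucketOf A k)) (PySem.Set.ofList (A.map digitSum)) (-1)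

lemma Fg_max (g : Int → Int) (K : List Int) : ∀ a c : Int, Fg g K (max a c) = max (Fg g K a) c := by
  induction K with
  | nil => intro a c; simp [Fg]
  | cons k K ih =>
      intro a c
      simp only [Fg, List.foldl_cons] at *
      have : max (max a c) (g k) = max (max a (g k)) c := by omega
      rw [this, ih, ih]

lemma le_Fg (g : Int → Int) (K : List Int) : ∀ b : Int, b ≤ Fg g K b := by
  induction K with
  | nil => intro b; simp [Fg]
  | cons k K ih =>
      intro b
      simp only [Fg, List.foldl_cons] at *
      exact le_trans (le_max_left _ _) (ih _)

lemma Fg_congr (g g' : Int → Int) (K : List Int) (h : ∀ j ∈ K, g j = g' j) :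
    ∀ b : Int, Fg g K b = Fg g' K b := by
  induction K with
  | nil => intro b; simp [Fg]
  | cons k K ih =>
      intro b
      simp only [Fg, List.foldl_cons] at *
      rw [h k (by simp), ih (fun j hj => h j (by simp [hj]))]

lemma Fg_erase (g : Int → Int) (K : List Int) :
    ∀ b : Int, ∀ k ∈ K, Fg g K b = max (Fg g (K.erase k) b) (g k) := by
  induction K with
  | nil => intro b k hk; simp at hk
  | cons j K ih =>
      intro b k hk
      by_cases hjk : j = k
      · subst hjk
        simp only [List.erase_cons_head, Fg, List.foldl_cons]
        exact Fg_max g K b (g j)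
      · have hk' : k ∈ K := by
          rcases List.mem_cons.mp hk with h | h
          · exact absurd h.symm hjk
          · exact h
        rw [List.erase_cons_tail (by simp [hjk])]
        simp only [Fg, List.foldl_cons]
        exact ih _ k hk'

-- ---- characterizing B's buckets ----

lemma buildBuckets_keys (A : List Int) :
    (buildBuckets A).keys = PySem.Set.ofList (A.map digitSum) := by
  unfold buildBuckets
  rw [PySem.Dict.keys_foldl_modify_key]
  simp [PySem.Set.update_nil_left]

lemma buildBuckets_nodup (A : List Int) : (buildBuckets A).keys.Nodup := by
  rw [buildBuckets_keys]; exact PySem.Set.nodup_ofList _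

lemma buildBuckets_getD (A : List Int) (k : Int) :
    (buildBuckets A).getD k [] = bucketOf A k := by
  unfold buildBuckets
  have h : A.foldl (fun d num => d.modify (digitSum num) [] (fun l => l ++ [num])) PySem.Dict.empty
      = (A.map (fun n => (digitSum n, n))).foldl
          (fun d p => d.modify p.1 [] (fun l => l ++ [p.2])) PySem.Dict.empty := by
    rw [List.foldl_map]
  rw [h, PySem.Dict.getD_foldl_modify_append]
  simp [bucketOf, List.filter_map, Function.comp_def]

-- B's second pass equals the max-fold over contribs once the accumulator is ≥ -1
lemma body_eq_Fg (g : Int → List Int) (K : List Int) :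
    ∀ b : Int, -1 ≤ b →
      K.foldl (fun best k => if 2 ≤ (g k).length then max best (top2sum (g k)) else best) b
        = Fg (fun k => contrib (g k)) K b := by
  induction K with
  | nil => intro b _; simp [Fg]
  | cons k K ih =>
      intro b hb
      simp only [Fg, List.foldl_cons] at *
      unfold contrib
      by_cases h2 : 2 ≤ (g k).length
      · simp only [if_pos h2]
        exact ih _ (le_trans (le_trans hb (le_max_left _ _)) (le_refl _))
      · simp only [if_neg h2]
        have : max b (-1) = b := max_eq_left hb
        rw [this]
        exact ih _ hb

lemma alt_eq_BV (A : List Int) : solution_alt A = BV A := by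
  unfold solution_alt BV
  have hv : (buildBuckets A).values
      = (buildBuckets A).keys.map (fun k => (buildBuckets A).getD k []) :=
    PySem.Dict.values_eq_map_keys _ (buildBuckets_nodup A) []
  rw [hv, List.foldl_map, buildBuckets_keys]
  have hg : ∀ k, (buildBuckets A).getD k [] = bucketOf A k := buildBuckets_getD A
  simp only [hg]
  exact body_eq_Fg (fun k => bucketOf A k) _ (-1) (le_refl _)

-- ---- characterizing A's dict ----

def stepD (d : PySem.Dict Int Int) (num : Int) : PySem.Dict Int Int :=
  d.insert (digitSum num) (max (d.getD (digitSum num) 0) num)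

lemma fold_fst (l : List Int) : ∀ (d : PySem.Dict Int Int) (m : Int),
    (l.foldl solStep (d, m)).1 = l.foldl stepD d := by
  induction l with
  | nil => intro d m; rfl
  | cons n l ih => intro d m; simp only [List.foldl_cons, solStep, stepD]; exact ih _ _

lemma foldD_keys (l : List Int) (d : PySem.Dict Int Int) :
    (l.foldl stepD d).keys = PySem.Set.update d.keys (l.map digitSum) := by
  unfold stepD
  exact PySem.Dict.keys_foldl_insert_key l digitSum _ d

lemma foldD_getD (l : List Int) : ∀ (d : PySem.Dict Int Int) (k : Int),
    (l.foldl stepD d).getD k 0 = (bucketOf l k).foldl max (d.getD k 0) := by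
  induction l with
  | nil => intro d k; simp [bucketOf]
  | cons n l ih =>
      intro d k
      simp only [List.foldl_cons]
      rw [ih]
      unfold bucketOf
      by_cases h : digitSum n = k
      · subst h
        simp [stepD, bucketOf]
      · rw [List.filter_cons_of_neg (by simp [h])]
        have : (stepD d n).getD k 0 = d.getD k 0 := by
          simp only [stepD, PySem.Dict.getD_insert]
          rw [if_neg (fun h' => h h'.symm)]
        rw [this]

-- ---- top-two scan lemmas ----

lemma t2fold_inv (r : List Int) : ∀ p : Int × Int, p.2 ≤ p.1 →
    (r.foldl t2step p).2 ≤ (r.foldl t2step p).1 ∧ (r.foldl t2step p).1 = r.foldl max p.1 := by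
  induction r with
  | nil => intro p hp; exact ⟨hp, rfl⟩
  | cons x r ih =>
      intro p hp
      simp only [List.foldl_cons]
      have hstep : (t2step p x).2 ≤ (t2step p x).1 ∧ (t2step p x).1 = max p.1 x := by
        unfold t2step; split_ifs <;> constructor <;> (try simp) <;> (try omega)
      rcases ih (t2step p x) hstep.1 with ⟨h1, h2⟩
      exact ⟨h1, by rw [h2, hstep.2]⟩

lemma t2step_sum (p : Int × Int) (hp : p.2 ≤ p.1) (x : Int) :
    (t2step p x).1 + (t2step p x).2 = max (p.1 + p.2) (x + p.1) := by
  unfold t2step; split_ifs <;> (try simp) <;> (try omega)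

lemma top2sum_snoc (a b : Int) (rest : List Int) (x : Int) (ha : 0 ≤ a) :
    top2sum ((a :: b :: rest) ++ [x])
      = max (top2sum (a :: b :: rest)) (x + (a :: b :: rest).foldl max 0) := by
  have hp0 : (if a ≥ b then ((a : Int), b) else (b, a)).2 ≤ (if a ≥ b then ((a : Int), b) else (b, a)).1 := by
    split_ifs <;> (try simp) <;> (try omega)
  have hq := t2fold_inv rest _ hp0
  simp only [top2sum, List.cons_append, List.foldl_append, List.foldl_cons, List.foldl_nil]
  rw [t2step_sum _ hq.1 x, hq.2]
  have h1 : (if a ≥ b then ((a : Int), b) else (b, a)).1 = max (max 0 a) b := by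
    split_ifs <;> (try simp) <;> (try omega)
  rw [h1]

lemma contrib_snoc (l : List Int) (x : Int) (hne : l ≠ [])
    (hnn : ∀ y ∈ l, 0 ≤ y) (hx : 0 ≤ x) :
    contrib (l ++ [x]) = max (contrib l) (x + l.foldl max 0) := by
  match l with
  | [a] =>
      have ha : 0 ≤ a := hnn a (by simp)
      simp only [contrib, top2sum, List.cons_append, List.nil_append]
      simp
      split_ifs <;> (try simp) <;> (try omega)
  | a :: b :: rest =>
      have ha : 0 ≤ a := hnn a (by simp)
      have hlen : 2 ≤ (a :: b :: rest).length := by simp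
      have _hu := hne
      have hlen' : 2 ≤ ((a :: b :: rest) ++ [x]).length := by simp
      simp only [contrib, if_pos hlen, if_pos hlen']
      exact top2sum_snoc a b rest x ha

lemma bucket_append (t : List Int) (x k : Int) :
    bucketOf (t ++ [x]) k
      = bucketOf t k ++ (if digitSum x = k then [x] else []) := by
  unfold bucketOf
  rw [List.filter_append]
  by_cases h : digitSum x = k <;> simp [h]

lemma bucket_nonempty (t : List Int) (k : Int)
    (hk : k ∈ PySem.Set.ofList (t.map digitSum)) : bucketOf t k ≠ [] := by
  rw [PySem.Set.mem_ofList] at hk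
  rcases List.mem_map.mp hk with ⟨n, hn, hds⟩
  unfold bucketOf
  intro hnil
  have := List.filter_eq_nil_iff.mp hnil n hn
  exact this (by simp [hds])

lemma bucket_empty (t : List Int) (k : Int)
    (hk : k ∉ PySem.Set.ofList (t.map digitSum)) : bucketOf t k = [] := by
  rw [PySem.Set.mem_ofList] at hk
  unfold bucketOf
  rw [List.filter_eq_nil_iff]
  intro n hn
  simp only [beq_iff_eq]
  intro h
  exact hk (List.mem_map.mpr ⟨n, hn, by simp [h]⟩)

lemma main_eq (A : List Int) (hnn : ∀ y ∈ A, 0 ≤ y) : solution A = BV A := by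
  induction A using List.reverseRecOn with
  | nil => rfl
  | append_singleton t x ih =>
      have hnt : ∀ y ∈ t, 0 ≤ y := fun y hy => hnn y (by simp [hy])
      have hx : 0 ≤ x := hnn x (by simp)
      have iht := ih hnt
      set cs := digitSum x with hcs
      set K := PySem.Set.ofList (t.map digitSum) with hK
      -- A's side: one more step of the fold
      have hA : solution (t ++ [x])
          = (solStep (t.foldl solStep (PySem.Dict.empty, -1)) x).2 := by
        unfold solution
        rw [List.foldl_append]
        rfl
      have hfst : (t.foldl solStep (PySem.Dict.empty, -1)).1 = t.foldl stepD PySem.Dict.empty :=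
        fold_fst t _ _
      have hsnd : (t.foldl solStep (PySem.Dict.empty, -1)).2 = BV t := iht
      have hkeys : (t.foldl stepD PySem.Dict.empty).keys = K := by
        rw [foldD_keys]
        simp [PySem.Set.update_nil_left, hK]
      have hgetD : (t.foldl stepD PySem.Dict.empty).getD cs 0 = (bucketOf t cs).foldl max 0 := by
        rw [foldD_getD]
        simp
      have hcont : (t.foldl stepD PySem.Dict.empty).contains cs = true ↔ cs ∈ K := by
        rw [PySem.Dict.contains_iff_mem_keys, hkeys]
      -- notation for g and g'
      set g : Int → Int := fun k => contrib (bucketOf t k) with hg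
      set g' : Int → Int := fun k => contrib (bucketOf (t ++ [x]) k) with hg'
      have hK' : PySem.Set.ofList ((t ++ [x]).map digitSum) = PySem.Set.add K cs := by
        rw [List.map_append]
        simp [PySem.Set.ofList_append_singleton, hK, hcs]
      have hBV' : BV (t ++ [x]) = Fg g' (PySem.Set.add K cs) (-1) := by
        unfold BV
        rw [hK']
      have hgg' : ∀ j, j ≠ cs → g j = g' j := by
        intro j hj
        simp only [hg, hg', bucket_append]
        rw [if_neg (fun h => hj h.symm)]
        simp
      by_cases hmem : cs ∈ K
      · -- key already present: A takes the max with x + stored max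
        have hAval : solution (t ++ [x]) = max (BV t) (x + (bucketOf t cs).foldl max 0) := by
          rw [hA]
          simp only [solStep, hfst, hsnd, ← hcs]
          rw [if_pos (hcont.mpr hmem), hgetD]
        have hadd : PySem.Set.add K cs = K := PySem.Set.add_of_mem hmem
        have hne : bucketOf t cs ≠ [] := bucket_nonempty t cs (hK ▸ hmem)
        have hbnn : ∀ y ∈ bucketOf t cs, 0 ≤ y := by
          intro y hy
          exact hnt y (List.mem_of_mem_filter hy)
        have hg'cs : g' cs = max (g cs) (x + (bucketOf t cs).foldl max 0) := by
          have hb := bucket_append t x cs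
          rw [if_pos hcs.symm] at hb
          simp only [hg', hg, hb]
          exact contrib_snoc _ x hne hbnn hx
        have hKnd : K.Nodup := PySem.Set.nodup_ofList _
        have hcongr : Fg g' (K.erase cs) (-1) = Fg g (K.erase cs) (-1) := by
          refine (Fg_congr g' g _ ?_ _)
          intro j hj
          exact (hgg' j ((List.Nodup.mem_erase_iff hKnd).mp hj).1).symm
        rw [hBV', hadd, Fg_erase g' K (-1) cs hmem, hcongr, hg'cs, hAval]
        have : BV t = Fg g K (-1) := rfl
        rw [this, Fg_erase g K (-1) cs hmem]
        omega
      · -- fresh key: A leaves max_sum unchanged, B's new bucket is a singleton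
        have hAval : solution (t ++ [x]) = BV t := by
          rw [hA]
          simp only [solStep, hfst, hsnd, ← hcs]
          rw [if_neg (by simp only [hcont]; simp [hmem])]
        have hadd : PySem.Set.add K cs = K ++ [cs] := PySem.Set.add_of_not_mem hmem
        have hbe : bucketOf t cs = [] := bucket_empty t cs (hK ▸ hmem)
        have hg'cs : g' cs = -1 := by
          have hb := bucket_append t x cs
          rw [if_pos hcs.symm, hbe, List.nil_append] at hb
          simp only [hg', hb]
          simp [contrib]
        have hcongr : Fg g' K (-1) = Fg g K (-1) := by
          refine (Fg_congr g' g _ ?_ _)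
          intro j hj
          exact (hgg' j (fun h => hmem (h ▸ hj))).symm
        rw [hBV', hadd]
        have happ : Fg g' (K ++ [cs]) (-1) = max (Fg g' K (-1)) (g' cs) := by
          simp [Fg, List.foldl_append]
        rw [happ, hcongr, hg'cs, hAval]
        have hle : (-1 : Int) ≤ Fg g K (-1) := le_Fg g K (-1)
        have : BV t = Fg g K (-1) := rfl
        omega

-- ===== VERDICT (by name: the statement is the Claim_ definition above) =====
theorem solution_spec : Claim_equal_solution := by
  intro A _ hpre
  unfold Spec_solution
  rw [main_eq A hpre, alt_eq_BV]
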